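-- pv_equiv track=rewrite | github.com/mhairifin/SlidingBlockPuzzles | src/sbp/util/grid.py | toBoard
-- ===== SOURCE A (Python) =====
-- def toBoard(grid):
--     r = [0]*8
--     padded=[]
--     pieces = {}
--     for i in range(8):
--         padded.append(list(r))
--
--     num = 3
--
--     for row in range(len(grid)):
--         for col in range(len(grid)):
--             if grid[row][col] == 0 or grid[row][col] == 1:
--                 padded[row+1][col+1] = grid[row][col]+1
--                 pieces[grid[row][col]] = grid[row][col]+1
--             elif grid[row][col] not in pieces:
--                 pieces[grid[row][col]] = num
--                 padded[row+1][col+1] = num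
--                 num += 1
--             else:
--                 padded[row+1][col+1] = pieces[grid[row][col]]
--     padded[3][7]=1
--     return padded, pieces
-- ===== SOURCE B (Python) =====
-- def toBoard(grid):
--     n = len(grid)
--     # pass 1: discover all piece labels in first-appearance (row-major) order
--     pieces = {}
--     num = 3
--     for row in grid:
--         for v in row[:n]:
--             if v == 0 or v == 1:
--                 pieces[v] = v + 1
--             elif v not in pieces:
--                 pieces[v] = num
--                 num += 1
--     # pass 2: build the padded 8x8 board directly from the finished label map
--     board = [[0] * 8]
--     for row in grid:
--         board.append([0] + [pieces[v] for v in row[:n]] + [0] * (7 - n))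
--     board += [[0] * 8 for _ in range(7 - n)]
--     board[3][7] = 1
--     return board, pieces
-- ===== Notes on version B (the rewrite author's own statement) =====
-- stated objective: alternative
-- what changed: B replaces A's single interleaved loop that mutates a preallocated 8x8 board cell by cell with a two-phase decomposition: a first pass over the raw rows builds the complete piece-label map, then the padded board is constructed directly by list comprehension from the finished map (no in-place cell writes), plus the sentinel override.
import Mathlib
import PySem

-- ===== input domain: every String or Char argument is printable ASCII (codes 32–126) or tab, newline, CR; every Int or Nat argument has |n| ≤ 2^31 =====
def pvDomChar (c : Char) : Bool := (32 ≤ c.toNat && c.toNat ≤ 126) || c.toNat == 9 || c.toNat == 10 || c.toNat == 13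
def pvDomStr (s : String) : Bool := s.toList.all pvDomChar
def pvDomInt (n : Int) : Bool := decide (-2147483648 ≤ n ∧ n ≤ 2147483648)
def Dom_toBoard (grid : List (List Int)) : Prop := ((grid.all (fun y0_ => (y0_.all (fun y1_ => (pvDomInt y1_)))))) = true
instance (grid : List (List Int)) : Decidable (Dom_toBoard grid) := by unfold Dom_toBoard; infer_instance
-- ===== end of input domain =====

-- B rebuilds the padded board in two phases (label map first, then direct construction) instead of
-- A's single interleaved loop mutating a preallocated 8x8 board; equal return values on Pre_.

-- ===== PORT A =====
-- body of A's inner loop (reads grid[row][col], writes padded[row+1][col+1], updates pieces/num)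
def aStep (grid : List (List Int)) (st : List (List Int) × PySem.Dict Int Int × Int)
    (row col : Int) : List (List Int) × PySem.Dict Int Int × Int :=
  let padded := st.1
  let pieces := st.2.1
  let num := st.2.2
  let v := PySem.List.pyGetD (PySem.List.pyGetD grid row []) col 0
  if v = 0 ∨ v = 1 then
    (PySem.List.pySetD padded (row+1)
       (PySem.List.pySetD (PySem.List.pyGetD padded (row+1) []) (col+1) (v+1)),
     pieces.insert v (v+1), num)
  else if ¬ pieces.contains v then
    (PySem.List.pySetD padded (row+1)
       (PySem.List.pySetD (PySem.List.pyGetD padded (row+1) []) (col+1) num),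
     pieces.insert v num, num + 1)
  else
    (PySem.List.pySetD padded (row+1)
       (PySem.List.pySetD (PySem.List.pyGetD padded (row+1) []) (col+1) (pieces.getD v 0)),
     pieces, num)

def toBoard (grid : List (List Int)) : List (List Int) × (List (Int × Int)) :=
  let r : List Int := List.replicate 8 0
  let padded0 : List (List Int) := (PySem.List.pyRange 0 8 1).foldl (fun p _ => p ++ [r]) []
  let n : Int := grid.length
  let st := (PySem.List.pyRange 0 n 1).foldl (fun st row =>
      (PySem.List.pyRange 0 n 1).foldl (fun st col => aStep grid st row col) st)
    (padded0, PySem.Dict.empty, 3)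
  let padded := PySem.List.pySetD st.1 3
      (PySem.List.pySetD (PySem.List.pyGetD st.1 3 []) 7 1)
  (padded, st.2.1.items)

-- ===== PORT B =====
-- body of B's first pass (pieces/num update for one cell value)
def pnStep (st : PySem.Dict Int Int × Int) (v : Int) : PySem.Dict Int Int × Int :=
  if v = 0 ∨ v = 1 then (st.1.insert v (v+1), st.2)
  else if ¬ st.1.contains v then (st.1.insert v st.2, st.2 + 1)
  else st

def toBoard_alt (grid : List (List Int)) : List (List Int) × (List (Int × Int)) :=
  let n : Int := grid.length
  let st := grid.foldl (fun st row => (PySem.List.slice row none (some n)).foldl pnStep st)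
      (PySem.Dict.empty, 3)
  let pieces := st.1
  let board := [List.replicate 8 0]
      ++ grid.map (fun row =>
           [0] ++ (PySem.List.slice row none (some n)).map (fun v => pieces.getD v 0)
               ++ List.replicate (7 - n).toNat 0)
      ++ List.replicate (7 - n).toNat (List.replicate 8 0)
  let board' := PySem.List.pySetD board 3
      (PySem.List.pySetD (PySem.List.pyGetD board 3 []) 7 1)
  (board', pieces.items)

-- ===== PRECONDITION & SPEC =====
-- A returns normally iff the board fits (at most 7 rows; row index+1 stays below 8) and every row
-- reaches width len(grid); otherwise A raises IndexError — exactly those inputs are excluded.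
def Pre_toBoard (grid : List (List Int)) : Prop :=
  grid.length ≤ 7 ∧ ∀ row ∈ grid, grid.length ≤ row.length
instance (grid : List (List Int)) : Decidable (Pre_toBoard grid) := by unfold Pre_toBoard; infer_instance
def pvWitness_toBoard : List (List Int) := [[0, 2], [2, 1]]

def Spec_toBoard (grid : List (List Int)) (out : List (List Int) × (List (Int × Int))) : Prop := out = toBoard_alt grid
instance (grid : List (List Int)) (out : List (List Int) × (List (Int × Int))) : Decidable (Spec_toBoard grid out) := by unfold Spec_toBoard; infer_instance

-- ===== CLAIM (what is proved, stated in full; the proofs are below) =====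
def Claim_equal_toBoard : Prop := ∀ (grid : List (List Int)), Dom_toBoard grid → Pre_toBoard grid → Spec_toBoard grid (toBoard grid)

-- ===== LEMMAS AND PROOFS =====

-- the board write padded[r+1][c+1] = w
def wrB (p : List (List Int)) (r c w : Int) : List (List Int) :=
  PySem.List.pySetD p (r+1) (PySem.List.pySetD (PySem.List.pyGetD p (r+1) []) (c+1) w)

-- value A writes at a cell holding v, given the current pieces/num state
def cellVal (d : PySem.Dict Int Int) (m v : Int) : Int :=
  if v = 0 ∨ v = 1 then v + 1 else if ¬ d.contains v then m else d.getD v 0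

-- A's step, abstracted to an explicit (row, col, value) cell
def cStep (st : List (List Int) × PySem.Dict Int Int × Int) (x : Int × Int × Int) :
    List (List Int) × PySem.Dict Int Int × Int :=
  (wrB st.1 x.1 x.2.1 (cellVal st.2.1 st.2.2 x.2.2), pnStep st.2 x.2.2)

-- 0 and 1 always carry labels 1 and 2 in the pieces dict
def InvD (d : PySem.Dict Int Int) : Prop :=
  (∀ w, d.get? 0 = some w → w = 1) ∧ (∀ w, d.get? 1 = some w → w = 2)

lemma astep_eq (grid : List (List Int)) (st : List (List Int) × PySem.Dict Int Int × Int)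
    (row col : Int) :
    aStep grid st row col
      = cStep st (row, col, PySem.List.pyGetD (PySem.List.pyGetD grid row []) col 0) := by
  simp only [aStep, cStep, wrB, cellVal, pnStep]
  split_ifs <;> rfl

lemma enum_append_singleton {α : Type} (xs : List α) (x : α) (s : Int) :
    PySem.List.enumerate (xs ++ [x]) s
      = PySem.List.enumerate xs s ++ [(s + xs.length, x)] := by
  induction xs generalizing s with
  | nil => simp [PySem.List.enumerate_nil, PySem.List.enumerate_cons]
  | cons y ys ih =>
      simp only [List.cons_append, PySem.List.enumerate_cons, ih, List.length_cons]
      push_cast; ring_nf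

lemma inner_eq {σ α : Type} (f : σ → Int → α → σ) (d0 : α) :
    ∀ (n : Nat) (xs : List α), n ≤ xs.length → ∀ (s : σ),
    (PySem.List.pyRange 0 (n : Int) 1).foldl (fun s c => f s c (PySem.List.pyGetD xs c d0)) s
      = (PySem.List.enumerate (xs.take n) 0).foldl (fun s p => f s p.1 p.2) s := by
  intro n
  induction n with
  | zero => intro xs _ s; simp [PySem.List.pyRange_one_eq_nil, PySem.List.enumerate_nil]
  | succ n ih =>
      intro xs hn s
      have hc : ((n + 1 : Nat) : Int) = (n : Int) + 1 := by push_cast; ring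
      rw [hc, PySem.List.pyRange_one_succ_right (by positivity), List.foldl_append,
        ih xs (by omega) s]
      have ht : xs.take (n+1) = xs.take n ++ [xs[n]'(by omega)] :=
        List.take_succ_eq_append_getElem (by omega)
      rw [ht, enum_append_singleton, List.foldl_append]
      have hl : ((xs.take n).length : Int) = (n : Int) := by
        simp [List.length_take]; omega
      simp only [List.foldl_cons, List.foldl_nil, hl, zero_add]
      congr 1
      rw [PySem.List.pyGetD_natCast, List.getD_eq_getElem _ _ (by omega)]

lemma foldl_flatMap' {α β σ : Type} (g : α → List β) (f : σ → β → σ) :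
    ∀ (l : List α) (s : σ), (l.flatMap g).foldl f s = l.foldl (fun s a => (g a).foldl f s) s := by
  intro l s
  induction l generalizing s with
  | nil => rfl
  | cons a l ih => simp [List.flatMap_cons, List.foldl_append, ih]

-- drop the indices: folding pnStep over enumerate = folding it over the list
lemma foldl_enum_snd {α σ : Type} (f : σ → α → σ) :
    ∀ (l : List α) (j : Int) (s : σ),
    (PySem.List.enumerate l j).foldl (fun s p => f s p.2) s = l.foldl f s := by
  intro l
  induction l with
  | nil => intro j s; rfl
  | cons a l ih => intro j s; simp [PySem.List.enumerate_cons, ih]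

-- projection: the pieces/num component of A's fold is B's first pass
lemma proj_eq : ∀ (cs : List (Int × Int × Int)) (p : List (List Int)) (d : PySem.Dict Int Int) (m : Int),
    (cs.foldl cStep (p, d, m)).2 = cs.foldl (fun s x => pnStep s x.2.2) (d, m) := by
  intro cs
  induction cs with
  | nil => intro p d m; rfl
  | cons x cs ih =>
      intro x_1 d m
      simp only [List.foldl_cons, cStep]
      rw [ih]

lemma invD_pnStep (d : PySem.Dict Int Int) (m v : Int) (h : InvD d) :
    InvD (pnStep (d, m) v).1 := by
  by_cases h1 : v = 0 ∨ v = 1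
  · simp only [pnStep, if_pos h1]
    rcases h1 with rfl | rfl
    · constructor <;> intro w hw <;> rw [PySem.Dict.get?_insert] at hw
      · simp at hw; omega
      · rw [if_neg (by norm_num)] at hw; exact h.2 w hw
    · constructor <;> intro w hw <;> rw [PySem.Dict.get?_insert] at hw
      · rw [if_neg (by norm_num)] at hw; exact h.1 w hw
      · simp at hw; omega
  · by_cases h2 : d.contains v
    · simp only [pnStep, if_neg h1, if_neg (not_not_intro h2)]
      exact h
    · simp only [pnStep, if_neg h1, if_pos h2]
      rw [not_or] at h1
      constructor <;> intro w hw <;>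
        rw [PySem.Dict.get?_insert, if_neg (by omega)] at hw
      · exact h.1 w hw
      · exact h.2 w hw

lemma pnStep_get?_stable (d : PySem.Dict Int Int) (m v k w : Int)
    (h : InvD d) (hk : d.get? k = some w) : (pnStep (d, m) v).1.get? k = some w := by
  by_cases h1 : v = 0 ∨ v = 1
  · simp only [pnStep, if_pos h1]
    by_cases hkv : k = v
    · subst hkv
      rw [PySem.Dict.get?_insert_self]
      rcases h1 with rfl | rfl
      · rw [h.1 w hk]; norm_num
      · rw [h.2 w hk]; norm_num
    · rw [PySem.Dict.get?_insert_of_ne _ _ hkv]; exact hk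
  · by_cases h2 : d.contains v
    · simp only [pnStep, if_neg h1, if_neg (not_not_intro h2)]; exact hk
    · simp only [pnStep, if_neg h1, if_pos h2]
      have hkv : k ≠ v := by
        intro hh; subst hh
        rw [PySem.Dict.contains_eq_isSome_get?, hk] at h2; simp at h2
      rw [PySem.Dict.get?_insert_of_ne _ _ hkv]; exact hk

lemma pn_fold_stable {α : Type} (g : α → Int) :
    ∀ (l : List α) (d : PySem.Dict Int Int) (m k w : Int),
    InvD d → d.get? k = some w →
    ((l.foldl (fun s x => pnStep s (g x)) (d, m)).1).get? k = some w := by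
  intro l
  induction l with
  | nil => intro d m k w _ hk; exact hk
  | cons v l ih =>
      intro d m k w h hk
      simp only [List.foldl_cons]
      have := ih (pnStep (d, m) (g v)).1 (pnStep (d, m) (g v)).2 k w (invD_pnStep d m (g v) h)
        (pnStep_get?_stable d m (g v) k w h hk)
      simpa using this

lemma pnStep_get?_self (d : PySem.Dict Int Int) (m v : Int) :
    (pnStep (d, m) v).1.get? v = some (cellVal d m v) := by
  by_cases h1 : v = 0 ∨ v = 1
  · simp only [pnStep, cellVal, if_pos h1]
    exact PySem.Dict.get?_insert_self ..
  · by_cases h2 : d.contains v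
    · simp only [pnStep, cellVal, if_neg h1, if_neg (not_not_intro h2)]
      have h2' := h2
      rw [PySem.Dict.contains_eq_isSome_get?] at h2'
      obtain ⟨w, hw⟩ := Option.isSome_iff_exists.mp h2'
      rw [PySem.Dict.getD_eq_get?_getD, hw]; simp
    · simp only [pnStep, cellVal, if_neg h1, if_pos h2]
      exact PySem.Dict.get?_insert_self ..

-- main: A's writes all carry the FINAL label of the cell's value
lemma main_fold (D : PySem.Dict Int Int) :
    ∀ (cs : List (Int × Int × Int)) (p : List (List Int)) (d : PySem.Dict Int Int) (m : Int),
    InvD d → D = (cs.foldl (fun s x => pnStep s x.2.2) (d, m)).1 →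
    (cs.foldl cStep (p, d, m)).1
      = cs.foldl (fun q x => wrB q x.1 x.2.1 (D.getD x.2.2 0)) p := by
  intro cs
  induction cs with
  | nil => intro p d m _ _; rfl
  | cons x cs ih =>
      intro p d m hInv hD
      simp only [List.foldl_cons, cStep] at *
      have hval : D.getD x.2.2 0 = cellVal d m x.2.2 := by
        have h2 : D.get? x.2.2 = some (cellVal d m x.2.2) := by
          rw [hD]
          have := pn_fold_stable (fun y => y.2.2) cs (pnStep (d, m) x.2.2).1 (pnStep (d, m) x.2.2).2
            x.2.2 (cellVal d m x.2.2) (invD_pnStep d m x.2.2 hInv)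
            (pnStep_get?_self d m x.2.2)
          simpa using this
        rw [PySem.Dict.getD_eq_get?_getD, h2]; rfl
      rw [hval]
      have := ih (wrB p x.1 x.2.1 (cellVal d m x.2.2)) (pnStep (d, m) x.2.2).1
        (pnStep (d, m) x.2.2).2 (invD_pnStep d m x.2.2 hInv) (by simpa using hD)
      simpa using this

lemma set_pySetD_pySetD (b : List (List Int)) (i : Int) (hi : 0 ≤ i) (X Y : List Int) :
    PySem.List.pySetD (PySem.List.pySetD b i X) i Y = PySem.List.pySetD b i Y := by
  rw [PySem.List.pySetD_of_nonneg _ Y hi, PySem.List.pySetD_of_nonneg _ X hi,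
    PySem.List.pySetD_of_nonneg _ Y hi, List.set_set]

lemma pyGetD_pySetD_self (b : List (List Int)) (i : Int) (hi : 0 ≤ i)
    (hlt : i.toNat < b.length) (X : List Int) :
    PySem.List.pyGetD (PySem.List.pySetD b i X) i [] = X := by
  rw [PySem.List.pySetD_of_nonneg _ X hi,
    PySem.List.pyGetD_eq_getElem _ [] hi (by simp [List.length_set]; omega)]
  exact List.getElem_set_self (by simp [List.length_set]; omega)

-- one inner loop only rewrites board row r+1
lemma inner_write (F : Int → Int) :
    ∀ (vals : List Int) (j : Int) (b : List (List Int)) (r : Int), 0 ≤ r → r.toNat + 1 < b.length →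
    (PySem.List.enumerate vals j).foldl (fun q cp => wrB q r cp.1 (F cp.2)) b
      = PySem.List.pySetD b (r+1)
          ((PySem.List.enumerate vals j).foldl
            (fun R cp => PySem.List.pySetD R (cp.1+1) (F cp.2))
            (PySem.List.pyGetD b (r+1) [])) := by
  intro vals
  induction vals with
  | nil =>
      intro j b r hr hlt
      simp only [PySem.List.enumerate_nil, List.foldl_nil]
      symm
      rw [PySem.List.pyGetD_eq_getElem b [] (by omega) (by omega),
        PySem.List.pySetD_of_nonneg b _ (by omega)]
      exact List.set_getElem_self (by omega)
  | cons v vs ih =>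
      intro j b r hr hlt
      simp only [PySem.List.enumerate_cons, List.foldl_cons]
      rw [ih (j+1) (wrB b r j (F v)) r hr
        (by simp only [wrB, PySem.List.length_pySetD]; omega)]
      have e1 : PySem.List.pyGetD (wrB b r j (F v)) (r+1) []
          = PySem.List.pySetD (PySem.List.pyGetD b (r+1) []) (j+1) (F v) := by
        rw [wrB]
        exact pyGetD_pySetD_self b (r+1) (by omega) (by omega) _
      rw [e1]
      conv_lhs => rw [wrB]
      rw [set_pySetD_pySetD b (r+1) (by omega)]

-- filling one row: positions j+1 … j+len get the labels, the rest is untouched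
lemma row_fill (F : Int → Int) :
    ∀ (vals : List Int) (j : Nat) (R : List Int), j + 1 + vals.length ≤ R.length →
    (PySem.List.enumerate vals (j : Int)).foldl
        (fun R cp => PySem.List.pySetD R (cp.1+1) (F cp.2)) R
      = R.take (j+1) ++ vals.map F ++ R.drop (j+1+vals.length) := by
  intro vals
  induction vals with
  | nil =>
      intro j R h
      simp [PySem.List.enumerate_nil, List.take_append_drop]
  | cons v vs ih =>
      intro j R h
      simp only [PySem.List.enumerate_cons, List.foldl_cons, List.map_cons,
        List.length_cons] at *
      have hc : (j : Int) + 1 = ((j + 1 : Nat) : Int) := by push_cast; ring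
      rw [hc, PySem.List.pySetD_natCast, ih (j+1) _ (by simp [List.length_set]; omega)]
      have htl : (R.take (j+1)).length = j+1 := by rw [List.length_take]; omega
      have hT : (R.set (j+1) (F v)).take (j+1+1) = R.take (j+1) ++ [F v] := by
        apply List.ext_getElem
        · simp [List.length_take, List.length_set, htl]; omega
        · intro i h1 h2
          have hi2 : i < j + 1 + 1 := by
            rw [List.length_take, List.length_set] at h1; omega
          rw [List.getElem_take, List.getElem_set]
          by_cases hij : i = j + 1
          · subst hij
            rw [if_pos rfl, List.getElem_append_right (le_of_eq htl)]
            simp [htl]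
          · rw [if_neg (by omega), List.getElem_append_left (by rw [htl]; omega)]
            rw [List.getElem_take]
      have hD : (R.set (j+1) (F v)).drop (j+1+1+vs.length) = R.drop (j+1+(vs.length+1)) := by
        have he : j+1+1+vs.length = j+1+(vs.length+1) := by omega
        rw [he]
        apply List.ext_getElem
        · simp
        · intro i h1 h2
          rw [List.getElem_drop, List.getElem_drop, List.getElem_set, if_neg (by omega)]
      rw [hT, hD]
      simp [List.append_assoc]

-- the outer loop builds the board row by row
lemma outer_fill (F : Int → Int) (k : Nat) (hkk : k ≤ 7) :
    ∀ (rows : List (List Int)) (r : Nat) (done : List (List Int)),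
    done.length = r + 1 → r + rows.length ≤ 7 → (∀ row ∈ rows, k ≤ row.length) →
    (PySem.List.enumerate rows (r : Int)).foldl
        (fun q rp =>
          (PySem.List.enumerate (rp.2.take k) 0).foldl
            (fun q cp => wrB q rp.1 cp.1 (F cp.2)) q)
        (done ++ List.replicate (7 - r) (List.replicate 8 (0:Int)))
      = done ++ rows.map (fun row => [0] ++ (row.take k).map F ++ List.replicate (7 - k) 0)
             ++ List.replicate (7 - r - rows.length) (List.replicate 8 (0:Int)) := by
  intro rows
  induction rows with
  | nil =>
      intro r done hd hr _
      simp [PySem.List.enumerate_nil]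
  | cons row rest ih =>
      intro r done hd hr hk
      have hr6 : r ≤ 6 := by simp at hr; omega
      have hk7 : k ≤ row.length := hk row (by simp)
      simp only [PySem.List.enumerate_cons, List.foldl_cons]
      set b : List (List Int) := done ++ List.replicate (7 - r) (List.replicate 8 (0:Int)) with hb
      have hblen : b.length = 8 := by simp [hb, hd]; omega
      rw [inner_write F (row.take k) 0 b (r : Int) (by positivity) (by simp [hblen]; omega)]
      have hkl : (row.take k).length = k := by rw [List.length_take]; omega
      have hget : PySem.List.pyGetD b ((r : Int)+1) [] = List.replicate 8 (0:Int) := by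
        rw [show ((r : Int) + 1) = ((r + 1 : Nat) : Int) by push_cast; ring,
          PySem.List.pyGetD_natCast, hb, List.getD_append_right done _ _ _ (le_of_eq hd), hd]
        rw [show r + 1 - (r + 1) = 0 from by omega,
          List.getD_eq_getElem?_getD, List.getElem?_replicate, if_pos (by omega)]
        rfl
      rw [hget]
      have hfill := row_fill F (row.take k) 0 (List.replicate 8 (0:Int))
        (by simp only [hkl, List.length_replicate]; omega)
      simp only [Nat.cast_zero, zero_add] at hfill
      rw [hfill]
      have hrow : (List.replicate 8 (0:Int)).take 1 ++ (row.take k).map F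
            ++ (List.replicate 8 (0:Int)).drop (1 + (row.take k).length)
          = [0] ++ (row.take k).map F ++ List.replicate (7 - k) 0 := by
        rw [hkl, List.take_replicate, List.drop_replicate,
          show min 1 8 = 1 from by decide, show 8 - (1+k) = 7 - k from by omega]
        rfl
      rw [hrow]
      have hset : PySem.List.pySetD b ((r : Int)+1)
            ([0] ++ (row.take k).map F ++ List.replicate (7 - k) 0)
          = (done ++ [[0] ++ (row.take k).map F ++ List.replicate (7 - k) 0])
            ++ List.replicate (7 - (r+1)) (List.replicate 8 (0:Int)) := by
        rw [show ((r : Int) + 1) = ((r + 1 : Nat) : Int) by push_cast; ring,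
          PySem.List.pySetD_natCast, hb]
        rw [List.set_append_right _ _ (le_of_eq hd)]
        have h7r : 7 - r = (6 - r) + 1 := by omega
        rw [hd, show r + 1 - (r+1) = 0 from by omega, h7r, List.replicate_succ]
        simp [List.append_assoc, show 7 - (r+1) = 6 - r from by omega]
      rw [hset]
      rw [show ((r : Int) + 1) = ((r + 1 : Nat) : Int) by push_cast; ring]
      rw [ih (r+1) _ (by simp [hd]) (by simp at hr ⊢; omega)
        (fun rw2 hrw => hk rw2 (by simp [hrw]))]
      rw [show 7 - (r+1) - rest.length = 7 - r - (rest.length + 1) from by omega]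
      simp [List.append_assoc]

-- row-major list of (row index, col index, value) cells that A's loops visit
def cellsOf (grid : List (List Int)) : List (Int × Int × Int) :=
  (PySem.List.enumerate grid 0).flatMap (fun rp =>
    (PySem.List.enumerate (rp.2.take grid.length) 0).map (fun cp => (rp.1, cp.1, cp.2)))

lemma invD_empty : InvD PySem.Dict.empty := by
  constructor <;> intro w hw <;> simp [PySem.Dict.get?_empty] at hw

lemma a_fold_eq (grid : List (List Int)) (hrows : ∀ row ∈ grid, grid.length ≤ row.length)
    (init : List (List Int) × PySem.Dict Int Int × Int) :
    (PySem.List.pyRange 0 (grid.length : Int) 1).foldl (fun st row =>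
        (PySem.List.pyRange 0 (grid.length : Int) 1).foldl
          (fun st col => aStep grid st row col) st) init
      = (cellsOf grid).foldl cStep init := by
  simp only [astep_eq]
  rw [inner_eq (fun (st : List (List Int) × PySem.Dict Int Int × Int) (row : Int) (xsrow : List Int) =>
      (PySem.List.pyRange 0 (grid.length : Int) 1).foldl
        (fun st col => cStep st (row, col, PySem.List.pyGetD xsrow col 0)) st)
    [] grid.length grid le_rfl init, List.take_length]
  rw [cellsOf, foldl_flatMap']
  apply PySem.List.foldl_congr_mem
  intro acc p hp
  have hmem : p.2 ∈ grid := by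
    rw [← PySem.List.map_snd_enumerate grid 0]
    exact List.mem_map_of_mem hp
  rw [inner_eq (fun st (col : Int) (v : Int) => cStep st (p.1, col, v)) 0
    grid.length p.2 (hrows p.2 hmem) acc, List.foldl_map]

lemma b_pn_eq (grid : List (List Int)) :
    grid.foldl (fun st row => (row.take grid.length).foldl pnStep st)
        (PySem.Dict.empty, (3:Int))
      = (cellsOf grid).foldl (fun s x => pnStep s x.2.2) (PySem.Dict.empty, 3) := by
  rw [cellsOf, foldl_flatMap']
  simp only [List.foldl_map, foldl_enum_snd]
  exact (foldl_enum_snd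
    (fun s row => List.foldl pnStep s (List.take grid.length row)) grid 0
    (PySem.Dict.empty, 3)).symm

-- ===== VERDICT (by name: the statement is the Claim_ definition above) =====
theorem toBoard_spec : Claim_equal_toBoard := by
  intro grid _ hPre
  obtain ⟨hk7, hrows⟩ := hPre
  show toBoard grid = toBoard_alt grid
  unfold toBoard toBoard_alt
  simp only [PySem.List.slice_to_natCast]
  have h7 : ((7:Int) - (grid.length : Int)).toNat = 7 - grid.length := by omega
  rw [h7]
  have hinit : (PySem.List.pyRange 0 8 1).foldl
      (fun p _ => p ++ [List.replicate 8 (0:Int)]) ([] : List (List Int))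
      = List.replicate 8 (List.replicate 8 (0:Int)) := by decide
  rw [hinit]
  rw [a_fold_eq grid hrows (List.replicate 8 (List.replicate 8 (0:Int)), PySem.Dict.empty, 3)]
  have hpieces : ((cellsOf grid).foldl cStep
      (List.replicate 8 (List.replicate 8 (0:Int)), PySem.Dict.empty, 3)).2
      = (cellsOf grid).foldl (fun s x => pnStep s x.2.2) (PySem.Dict.empty, 3) :=
    proj_eq (cellsOf grid) _ _ _
  have hpn := b_pn_eq grid
  have hpadded : ((cellsOf grid).foldl cStep
      (List.replicate 8 (List.replicate 8 (0:Int)), PySem.Dict.empty, 3)).1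
      = [List.replicate 8 (0:Int)]
        ++ grid.map (fun row => [0] ++ (row.take grid.length).map (fun v =>
             ((cellsOf grid).foldl (fun s x => pnStep s x.2.2)
               (PySem.Dict.empty, (3:Int))).1.getD v 0)
             ++ List.replicate (7 - grid.length) 0)
        ++ List.replicate (7 - grid.length) (List.replicate 8 (0:Int)) := by
    rw [main_fold ((cellsOf grid).foldl (fun s x => pnStep s x.2.2)
        (PySem.Dict.empty, (3:Int))).1 (cellsOf grid) _ _ _ invD_empty rfl]
    rw [cellsOf, foldl_flatMap']
    simp only [List.foldl_map]
    have hout := outer_fill (fun v =>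
        ((cellsOf grid).foldl (fun s x => pnStep s x.2.2)
          (PySem.Dict.empty, (3:Int))).1.getD v 0) grid.length hk7 grid 0
      [List.replicate 8 (0:Int)] (by simp) (by omega) hrows
    simp only [Nat.cast_zero, Nat.sub_zero] at hout
    rw [show List.replicate 8 (List.replicate 8 (0:Int))
        = [List.replicate 8 (0:Int)] ++ List.replicate 7 (List.replicate 8 (0:Int)) from rfl]
    exact hout
  rw [hpadded, hpieces, hpn]
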